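-- pv_equiv track=rewrite | github.com/Eurphus/YHacks-fashion-ai | magictryon/inference/image_tryon/predict_image_tryon_customize.py | adjust_size
-- ===== SOURCE A (Python) =====
-- import math
--
-- def adjust_size(value):
--     # Round up to divisible by 8 first
--     if value % 8 != 0:
--         value = math.ceil(value / 8) * 8
--     # Then adjust until (value // 8) % 10 == 4 or 8
--     while True:
--         last_digit = (value // 8) % 10
--         if last_digit in [4, 8]:
--             return value
--         value += 8  # Increment by 8 until it meets the condition
-- ===== SOURCE B (Python) =====
-- def adjust_size(value):
--     # Ceiling-divide by 8 to get the quotient of the rounded-up multiple of 8,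
--     # then jump directly to the next quotient ending in 4 or 8 via its last digit.
--     q = -((-value) // 8)
--     r = q % 10
--     offset = (4 - r) if r <= 4 else (8 - r) if r <= 8 else 5
--     return (q + offset) * 8
-- ===== Notes on version B (the rewrite author's own statement) =====
-- stated objective: simpler
-- what changed: Replaces A's bounded while-loop search with a direct closed-form computation: ceiling-divide by 8, then compute the offset to the next quotient ending in 4 or 8 from its last digit mod 10.
import Mathlib
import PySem

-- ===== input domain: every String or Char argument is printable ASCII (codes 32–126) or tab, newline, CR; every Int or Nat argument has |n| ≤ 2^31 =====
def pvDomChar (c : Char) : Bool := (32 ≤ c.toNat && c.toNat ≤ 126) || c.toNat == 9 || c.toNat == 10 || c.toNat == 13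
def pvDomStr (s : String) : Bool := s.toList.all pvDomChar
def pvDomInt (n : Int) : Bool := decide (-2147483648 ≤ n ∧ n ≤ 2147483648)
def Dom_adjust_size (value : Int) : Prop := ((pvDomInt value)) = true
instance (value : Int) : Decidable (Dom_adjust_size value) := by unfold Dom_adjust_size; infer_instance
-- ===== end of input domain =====

-- B replaces A's bounded search loop by a closed modular formula on the last digit of the
-- rounded-up quotient (objective: simpler).


-- ===== PORT A =====
-- the 'while True' loop: each iteration returns when (value // 8) % 10 ∈ {4, 8}, else adds 8.
-- The quotient's last digit cycles through all residues mod 10, so the loop always returns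
-- within 6 iterations; fuel 10 therefore only makes the same computation total.
def adjustLoopA : Nat → Int → Int
  | 0, v => v
  | n+1, v =>
    let lastDigit := PySem.Int.mod (PySem.Int.floordiv v 8) 10
    if lastDigit = 4 ∨ lastDigit = 8 then v else adjustLoopA n (v + 8)

def adjust_size (value : Int) : Int :=
  -- math.ceil(value / 8) is exact ceiling division -((-value) // 8) for |value| ≤ 2^31
  let v := if PySem.Int.mod value 8 ≠ 0 then -(PySem.Int.floordiv (-value) 8) * 8 else value
  adjustLoopA 10 v

-- ===== PORT B =====
def adjust_size_alt (value : Int) : Int :=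
  let q := -(PySem.Int.floordiv (-value) 8)
  let r := PySem.Int.mod q 10
  let offset := if r ≤ 4 then 4 - r else if r ≤ 8 then 8 - r else 5
  (q + offset) * 8

-- ===== PRECONDITION & SPEC =====
def Spec_adjust_size (value : Int) (out : Int) : Prop := out = adjust_size_alt value
instance (value : Int) (out : Int) : Decidable (Spec_adjust_size value out) := by unfold Spec_adjust_size; infer_instance

-- ===== CLAIM (what is proved, stated in full; the proofs are below) =====
def Claim_equal_adjust_size : Prop := ∀ (value : Int), Dom_adjust_size value → Spec_adjust_size value (adjust_size value)

-- ===== LEMMAS AND PROOFS =====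
theorem adjustLoopA_step (n : Nat) (q : Int) :
    adjustLoopA (n+1) (q*8) =
      if q % 10 = 4 ∨ q % 10 = 8 then q*8 else adjustLoopA n ((q+1)*8) := by
  have h1 : PySem.Int.floordiv (q*8) 8 = q := by
    rw [PySem.Int.floordiv_eq_ediv_of_pos (by norm_num)]
    exact Int.mul_ediv_cancel _ (by norm_num)
  have h2 : PySem.Int.mod q 10 = q % 10 := PySem.Int.mod_eq_emod_of_pos (by norm_num)
  simp only [adjustLoopA, h1, h2]
  split_ifs <;> [rfl; (congr 1; ring)]

theorem adjustLoopA_closed (q : Int) :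
    adjustLoopA 10 (q*8) =
      (q + (if q % 10 ≤ 4 then 4 - q % 10 else if q % 10 ≤ 8 then 8 - q % 10 else 5)) * 8 := by
  rw [adjustLoopA_step 9 q, adjustLoopA_step 8, adjustLoopA_step 7, adjustLoopA_step 6,
      adjustLoopA_step 5, adjustLoopA_step 4]
  split_ifs <;> omega

-- ===== VERDICT (by name: the statement is the Claim_ definition above) =====
theorem adjust_size_spec : Claim_equal_adjust_size := by
  intro value _
  unfold Spec_adjust_size adjust_size adjust_size_alt
  have hfd : PySem.Int.floordiv (-value) 8 = (-value) / 8 :=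
    PySem.Int.floordiv_eq_ediv_of_pos (by norm_num)
  have hmod : PySem.Int.mod value 8 = value % 8 := PySem.Int.mod_eq_emod_of_pos (by norm_num)
  have hmq : ∀ x : Int, PySem.Int.mod x 10 = x % 10 :=
    fun x => PySem.Int.mod_eq_emod_of_pos (by norm_num)
  simp only [hfd, hmod, hmq]
  set q := -((-value)/8) with hq
  by_cases h : value % 8 = 0
  · have hv : value = q * 8 := by omega
    rw [if_neg (by simp [h]), hv, adjustLoopA_closed]
  · rw [if_pos h, adjustLoopA_closed]
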